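-- pv_equiv track=rewrite | github.com/AvocadoMoon/3500-HW | Honors Project/convexhull - Copy.py | leftMostIndex
-- ===== SOURCE A (Python) =====
-- def leftMostIndex(points):
--     minn = 0
--
--     for i in range(1,len(points)):
--         if points[i][0] < points[minn][0]:
--             minn = i
--         elif points[i][0] == points[minn][0]:
--             if points[i][1] > points[minn][1]:
--                 minn = i
--     return minn
-- ===== SOURCE B (Python) =====
-- def leftMostIndex(points):
--     if not points:
--         return 0
--     min_x = min(p[0] for p in points)
--     best_y = max(p[1] for p in points if p[0] == min_x)
--     return next(i for i, p in enumerate(points) if p[0] == min_x and p[1] == best_y)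
-- ===== Notes on version B (the rewrite author's own statement) =====
-- stated objective: alternative
-- what changed: Replaces A's single running-argmin index scan with staged value-based reduction: compute the minimum x over all points, then the maximum y among points with that x, then locate the first index holding exactly that point.
import Mathlib
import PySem

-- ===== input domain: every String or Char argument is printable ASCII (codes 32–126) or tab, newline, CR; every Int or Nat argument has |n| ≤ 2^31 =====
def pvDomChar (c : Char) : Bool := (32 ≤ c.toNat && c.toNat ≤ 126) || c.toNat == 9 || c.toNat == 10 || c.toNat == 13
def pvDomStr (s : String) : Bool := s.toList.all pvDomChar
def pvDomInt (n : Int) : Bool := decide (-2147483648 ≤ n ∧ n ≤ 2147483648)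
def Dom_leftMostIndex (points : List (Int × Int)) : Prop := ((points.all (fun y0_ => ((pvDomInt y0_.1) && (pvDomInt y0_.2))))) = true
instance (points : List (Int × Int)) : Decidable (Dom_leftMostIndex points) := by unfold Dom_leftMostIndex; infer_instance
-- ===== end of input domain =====

-- B replaces A's running-argmin index scan by staged value passes (min x, then max y among
-- leftmost points, then the first index holding that point); same O(n) cost, no speed claim.

-- ===== PORT A =====
-- explicit for-loop over range(1, len(points)) with accumulator minn
def leftMostIndex (points : List (Int × Int)) : Int :=
  (PySem.List.pyRange 1 points.length 1).foldl
    (fun minn i =>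
      let pi := (PySem.List.pyGet? points i).getD (0, 0)
      let pm := (PySem.List.pyGet? points minn).getD (0, 0)
      if pi.1 < pm.1 then i
      else if pi.1 = pm.1 then (if pi.2 > pm.2 then i else minn) else minn)
    0

-- ===== PORT B =====
-- staged passes: min_x = min(p[0] …); best_y = max(p[1] … if p[0]==min_x);
-- next(i for i, p in enumerate(points) if p[0]==min_x and p[1]==best_y) = first matching index
def leftMostIndex_alt (points : List (Int × Int)) : Int :=
  if points = [] then 0
  else
    match PySem.List.min? (points.map Prod.fst) (fun x => x) with
    | none => 0
    | some mx =>
      match PySem.List.max? ((points.filter (fun p => p.1 == mx)).map Prod.snd) (fun y => y) with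
      | none => 0
      | some my => ((points.findIdx (fun p => p.1 == mx && p.2 == my) : Nat) : Int)

-- ===== PRECONDITION & SPEC =====
def Spec_leftMostIndex (points : List (Int × Int)) (out : Int) : Prop := out = leftMostIndex_alt points
instance (points : List (Int × Int)) (out : Int) : Decidable (Spec_leftMostIndex points out) := by unfold Spec_leftMostIndex; infer_instance

-- ===== CLAIM (what is proved, stated in full; the proofs are below) =====
def Claim_equal_leftMostIndex : Prop := ∀ (points : List (Int × Int)), Dom_leftMostIndex points → Spec_leftMostIndex points (leftMostIndex points)

-- ===== LEMMAS AND PROOFS =====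

-- strict "is a better choice" order on points: smaller x, or equal x and larger y
def better (a b : Int × Int) : Prop := a.1 < b.1 ∨ (a.1 = b.1 ∧ b.2 < a.2)

-- element at a Nat index, totalised with the same default A's port uses
def gp (points : List (Int × Int)) (m : Nat) : Int × Int := points.getD m (0, 0)

-- j is THE index both programs return: in range, no point strictly better, strictly better than every earlier point
def GoodIdx (points : List (Int × Int)) (j : Nat) : Prop :=
  j < points.length ∧
  (∀ m, m < points.length → ¬ better (gp points m) (gp points j)) ∧
  (∀ m, m < j → better (gp points j) (gp points m))

theorem better_irrefl (a : Int × Int) : ¬ better a a := by unfold better; omega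

theorem better_trans {a b c : Int × Int} (h1 : better a b) (h2 : better b c) : better a c := by
  unfold better at *; omega

theorem better_key {m j k : Int × Int} (h1 : ¬ better m j) (h2 : better k j) : better k m := by
  unfold better at *; omega

theorem goodIdx_unique {points : List (Int × Int)} {j1 j2 : Nat}
    (h1 : GoodIdx points j1) (h2 : GoodIdx points j2) : j1 = j2 := by
  obtain ⟨hl1, hmin1, hfirst1⟩ := h1
  obtain ⟨hl2, hmin2, hfirst2⟩ := h2
  rcases Nat.lt_trichotomy j1 j2 with h | h | h
  · exact absurd (hfirst2 j1 h) (hmin1 j2 hl2)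
  · exact h
  · exact absurd (hfirst1 j2 h) (hmin2 j1 hl1)

theorem gp_eq_getElem (points : List (Int × Int)) (m : Nat) (h : m < points.length) :
    gp points m = points[m] := List.getD_eq_getElem points (0, 0) h

-- A's fold over indices 1..k-1 returns a GoodIdx-style index for the length-k prefix
theorem a_loop_invariant (points : List (Int × Int)) (k : Nat) (hk1 : 1 ≤ k)
    (hk : k ≤ points.length) :
    ∃ j : Nat,
      (PySem.List.pyRange 1 (k : Int) 1).foldl
        (fun minn i =>
          let pi := (PySem.List.pyGet? points i).getD (0, 0)
          let pm := (PySem.List.pyGet? points minn).getD (0, 0)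
          if pi.1 < pm.1 then i
          else if pi.1 = pm.1 then (if pi.2 > pm.2 then i else minn) else minn)
        0 = (j : Int) ∧
      j < k ∧
      (∀ m, m < k → ¬ better (gp points m) (gp points j)) ∧
      (∀ m, m < j → better (gp points j) (gp points m)) := by
  induction k with
  | zero => omega
  | succ k ih =>
    by_cases hk0 : k = 0
    · subst hk0
      refine ⟨0, ?_, by omega, ?_, by omega⟩
      · simp [PySem.List.pyRange_one_eq_nil]
      · intro m hm
        interval_cases m
        exact better_irrefl _
    · obtain ⟨j, hfold, hjk, hmin, hfirst⟩ := ih (by omega) (by omega)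
      have hsplit : PySem.List.pyRange 1 ((k : Int) + 1) 1
          = PySem.List.pyRange 1 (k : Int) 1 ++ [(k : Int)] := by
        exact PySem.List.pyRange_one_succ_right (by omega)
      have hkl : k < points.length := by omega
      have hget_k : PySem.List.pyGet? points ((k : Nat) : Int) = some (gp points k) := by
        rw [PySem.List.pyGet?_natCast, List.getElem?_eq_getElem hkl, gp_eq_getElem points k hkl]
      have hget_j : PySem.List.pyGet? points ((j : Nat) : Int) = some (gp points j) := by
        have hjl : j < points.length := by omega
        rw [PySem.List.pyGet?_natCast, List.getElem?_eq_getElem hjl, gp_eq_getElem points j hjl]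
      have hpush : (k : Int) + 1 = ((k + 1 : Nat) : Int) := by push_cast; ring
      rw [← hpush, hsplit, List.foldl_append, hfold]
      simp only [List.foldl_cons, List.foldl_nil, hget_k, hget_j, Option.getD_some]
      by_cases hb : better (gp points k) (gp points j)
      · refine ⟨k, ?_, by omega, ?_, ?_⟩
        · unfold better at hb
          split_ifs with h1 h2 h3 <;> first | rfl | omega
        · intro m hm
          rcases Nat.lt_or_ge m k with hmk | hmk
          · intro hc
            exact hmin m hmk (better_trans hc hb)
          · have : m = k := by omega
            subst this
            exact better_irrefl _
        · intro m hm
          exact better_key (hmin m (by omega)) hb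
      · refine ⟨j, ?_, by omega, ?_, hfirst⟩
        · unfold better at hb
          split_ifs with h1 h2 h3 <;> first | rfl | omega
        · intro m hm
          rcases Nat.lt_or_ge m k with hmk | hmk
          · exact hmin m hmk
          · have : m = k := by omega
            subst this
            exact hb

theorem a_good (points : List (Int × Int)) (hne : points ≠ []) :
    ∃ j : Nat, leftMostIndex points = (j : Int) ∧ GoodIdx points j := by
  have hlen : 1 ≤ points.length := List.length_pos_iff.mpr hne
  obtain ⟨j, hfold, hjk, hmin, hfirst⟩ := a_loop_invariant points points.length hlen le_rfl
  exact ⟨j, by unfold leftMostIndex; exact_mod_cast hfold, hjk, hmin, hfirst⟩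

theorem b_good (points : List (Int × Int)) (hne : points ≠ []) :
    ∃ j : Nat, leftMostIndex_alt points = (j : Int) ∧ GoodIdx points j := by
  -- the min-x pass
  have hmapne : points.map Prod.fst ≠ [] := by simpa using hne
  obtain ⟨mx, hmx⟩ : ∃ mx, PySem.List.min? (points.map Prod.fst) (fun x => x) = some mx := by
    cases h : PySem.List.min? (points.map Prod.fst) (fun x => x) with
    | none => exact absurd ((PySem.List.min?_eq_none_iff _ _).mp h) hmapne
    | some v => exact ⟨v, rfl⟩
  have hmxmin : ∀ p ∈ points, mx ≤ p.1 := by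
    intro p hp
    exact PySem.List.min?_isMin hmx p.1 (List.mem_map_of_mem hp)
  obtain ⟨p0, hp0, hp0x⟩ : ∃ p ∈ points, p.1 = mx := by
    obtain ⟨p, hp, he⟩ := List.mem_map.mp (PySem.List.min?_mem hmx)
    exact ⟨p, hp, he⟩
  -- the max-y pass over the filtered points
  have hfilterne : (points.filter (fun p => p.1 == mx)).map Prod.snd ≠ [] := by
    have : p0 ∈ points.filter (fun p => p.1 == mx) :=
      List.mem_filter.mpr ⟨hp0, by simpa using hp0x⟩
    simpa using List.ne_nil_of_mem this
  obtain ⟨my, hmy⟩ : ∃ my, PySem.List.max?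
      ((points.filter (fun p => p.1 == mx)).map Prod.snd) (fun y => y) = some my := by
    cases h : PySem.List.max? ((points.filter (fun p => p.1 == mx)).map Prod.snd) (fun y => y) with
    | none => exact absurd ((PySem.List.max?_eq_none_iff _ _).mp h) hfilterne
    | some v => exact ⟨v, rfl⟩
  have hmymax : ∀ p ∈ points, p.1 = mx → p.2 ≤ my := by
    intro p hp hpx
    exact PySem.List.max?_isMax hmy p.2
      (List.mem_map_of_mem (List.mem_filter.mpr ⟨hp, by simpa using hpx⟩))
  obtain ⟨q0, hq0, hq0x, hq0y⟩ : ∃ q ∈ points, q.1 = mx ∧ q.2 = my := by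
    obtain ⟨q, hq, he⟩ := List.mem_map.mp (PySem.List.max?_mem hmy)
    obtain ⟨hq1, hq2⟩ := List.mem_filter.mp hq
    exact ⟨q, hq1, by simpa using hq2, he⟩
  -- the located index
  set pred := (fun p : Int × Int => p.1 == mx && p.2 == my) with hpred
  have hex : ∃ q ∈ points, pred q = true := ⟨q0, hq0, by simp [hpred, hq0x, hq0y]⟩
  set j := points.findIdx pred with hj
  have hjl : j < points.length := List.findIdx_lt_length_of_exists hex
  have hgj : (gp points j).1 = mx ∧ (gp points j).2 = my := by
    have := List.findIdx_getElem (p := pred) (xs := points) (w := hjl)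
    rw [← gp_eq_getElem points j hjl] at this
    simpa [hpred] using this
  refine ⟨j, ?_, hjl, ?_, ?_⟩
  · unfold leftMostIndex_alt
    rw [if_neg hne]
    simp only [hmx, hmy]
    rw [hj, hpred]
  · intro m hm
    have hmem : gp points m ∈ points := by
      rw [gp_eq_getElem points m hm]; exact List.getElem_mem hm
    have h1 := hmxmin _ hmem
    have h2 := hmymax _ hmem
    unfold better
    omega
  · intro m hm
    have hml : m < points.length := by omega
    have hmem : gp points m ∈ points := by
      rw [gp_eq_getElem points m hml]; exact List.getElem_mem hml
    have h1 := hmxmin _ hmem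
    have h2 := hmymax _ hmem
    have hnp : ¬ (pred points[m] = true) := by
      simpa using List.not_of_lt_findIdx (p := pred) (xs := points) hm
    rw [← gp_eq_getElem points m hml] at hnp
    simp only [hpred, Bool.and_eq_true, beq_iff_eq, not_and] at hnp
    unfold better
    by_cases hx : (gp points m).1 = mx
    · have := hnp hx
      have := h2 hx
      omega
    · omega

theorem leftMostIndex_spec : Claim_equal_leftMostIndex := by
  intro points _
  unfold Spec_leftMostIndex
  by_cases hnil : points = []
  · subst hnil; rfl
  · obtain ⟨j1, he1, hg1⟩ := a_good points hnil
    obtain ⟨j2, he2, hg2⟩ := b_good points hnil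
    rw [he1, he2, goodIdx_unique hg1 hg2]
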